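-- pv_equiv track=rewrite | github.com/multiSnow/mcomix3 | mcomix/smart_scrolling.py | _bresenham_sums
-- ===== SOURCE A (Python) =====
-- def _bresenham_sums(num, denom):
--     """ This algorithm is derived from Bresenham's line algorithm in
--     order to distribute the remainder of num/denom equally. See
--     https://en.wikipedia.org/wiki/Bresenham%27s_line_algorithm for details.
--     """
--     if num < 0:
--         raise ValueError("num < 0");
--     if denom < 1:
--         raise ValueError("denom < 1");
--     quotient = num // denom;
--     remainder = num % denom;
--     error = denom >> 1;
--     result = [0]
--     partial_sum = 0
--     for i in range(denom):
--         error -= remainder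
--         if error < 0:
--             error += denom
--             partial_sum += quotient + 1
--         else:
--             partial_sum += quotient
--         result.append(partial_sum)
--     return result
-- ===== SOURCE B (Python) =====
-- def _bresenham_sums(num, denom):
--     if num < 0:
--         raise ValueError("num < 0")
--     if denom < 1:
--         raise ValueError("denom < 1")
--     quotient = num // denom
--     remainder = num % denom
--     e0 = denom >> 1
--     return [i * quotient + (i * remainder + denom - 1 - e0) // denom
--             for i in range(denom + 1)]
-- ===== Notes on version B (the rewrite author's own statement) =====
-- stated objective: simpler
-- what changed: Replaces the Bresenham error-accumulation loop with running state (error, partial_sum, result) by a stateless list comprehension computing each prefix sum in closed form as i*quotient + (i*remainder + denom - 1 - (denom>>1)) // denom.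
import Mathlib
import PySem

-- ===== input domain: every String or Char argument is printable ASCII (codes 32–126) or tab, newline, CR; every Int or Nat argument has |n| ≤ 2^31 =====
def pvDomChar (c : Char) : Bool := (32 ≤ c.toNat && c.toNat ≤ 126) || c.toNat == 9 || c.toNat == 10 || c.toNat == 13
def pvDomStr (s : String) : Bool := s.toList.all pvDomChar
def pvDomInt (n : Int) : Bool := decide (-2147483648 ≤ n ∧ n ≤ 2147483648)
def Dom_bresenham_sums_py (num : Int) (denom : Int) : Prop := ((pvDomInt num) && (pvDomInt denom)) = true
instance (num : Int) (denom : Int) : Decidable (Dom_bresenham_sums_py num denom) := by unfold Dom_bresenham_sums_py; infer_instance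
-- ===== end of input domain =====

-- B replaces A's stateful Bresenham error-accumulation loop by a stateless closed-form
-- comprehension (objective: simpler); equal on all inputs where A returns (Pre_).

-- ===== PORT A =====
-- loop body of A's for-loop (the loop variable i is unused in Python's body)
def bresenhamStep (quotient remainder denom : Int) (st : Int × Int × List Int) :
    Int × Int × List Int :=
  let error := st.1 - remainder
  if error < 0 then
    let error := error + denom
    let partial_sum := st.2.1 + (quotient + 1)
    (error, partial_sum, st.2.2 ++ [partial_sum])
  else
    let partial_sum := st.2.1 + quotient
    (error, partial_sum, st.2.2 ++ [partial_sum])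

def bresenham_sums_py (num : Int) (denom : Int) : List Int :=
  if num < 0 then []          -- raise ValueError("num < 0"): outside Pre_
  else if denom < 1 then []   -- raise ValueError("denom < 1"): outside Pre_
  else
    let quotient := PySem.Int.floordiv num denom
    let remainder := PySem.Int.mod num denom
    let error := denom >>> (1 : Nat)
    let st := (PySem.List.pyRange 0 denom 1).foldl
      (fun st _ => bresenhamStep quotient remainder denom st) (error, 0, [0])
    st.2.2

-- ===== PORT B =====
def bresenham_sums_py_alt (num : Int) (denom : Int) : List Int :=
  if num < 0 then []          -- raise ValueError("num < 0"): outside Pre_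
  else if denom < 1 then []   -- raise ValueError("denom < 1"): outside Pre_
  else
    let quotient := PySem.Int.floordiv num denom
    let remainder := PySem.Int.mod num denom
    let e0 := denom >>> (1 : Nat)
    (PySem.List.pyRange 0 (denom + 1) 1).map
      (fun i => i * quotient + PySem.Int.floordiv (i * remainder + denom - 1 - e0) denom)

-- ===== PRECONDITION & SPEC =====
-- Pre_ excludes exactly the inputs where A raises ValueError (num < 0 or denom < 1); B raises there too.
def Pre_bresenham_sums_py (num : Int) (denom : Int) : Prop := 0 ≤ num ∧ 1 ≤ denom
instance (num : Int) (denom : Int) : Decidable (Pre_bresenham_sums_py num denom) := by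
  unfold Pre_bresenham_sums_py; infer_instance

def pvWitness_bresenham_sums_py : Int × Int := (7, 3)

def Spec_bresenham_sums_py (num : Int) (denom : Int) (out : List Int) : Prop :=
  out = bresenham_sums_py_alt num denom
instance (num : Int) (denom : Int) (out : List Int) : Decidable (Spec_bresenham_sums_py num denom out) := by
  unfold Spec_bresenham_sums_py; infer_instance

-- ===== CLAIM (what is proved, stated in full; the proofs are below) =====
def Claim_equal_bresenham_sums_py : Prop := ∀ (num : Int) (denom : Int), Dom_bresenham_sums_py num denom → Pre_bresenham_sums_py num denom → Spec_bresenham_sums_py num denom (bresenham_sums_py num denom)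

-- ===== LEMMAS AND PROOFS =====

-- the closed-form count of Bresenham "error drops" after i iterations
def bresDrops (r d e0 i : Int) : Int := PySem.Int.floordiv (i * r + d - 1 - e0) d

theorem bresDrops_bracket (r d e0 i : Int) (hd : 0 < d) :
    bresDrops r d e0 i * d ≤ i * r + d - 1 - e0 ∧
    i * r + d - 1 - e0 < (bresDrops r d e0 i + 1) * d := by
  unfold bresDrops
  exact (PySem.Int.floordiv_eq_iff_of_pos hd).mp rfl

-- one Bresenham step increments the drop count exactly when the error would go negative
theorem bresDrops_succ_pos (r d e0 i : Int) (hd : 0 < d) (hr1 : r < d)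
    (hcase : e0 - i * r + d * bresDrops r d e0 i - r < 0) :
    bresDrops r d e0 (i + 1) = bresDrops r d e0 i + 1 := by
  have hb := bresDrops_bracket r d e0 i hd
  unfold bresDrops at *
  rw [PySem.Int.floordiv_eq_iff_of_pos hd]
  constructor <;> nlinarith [hb.1, hb.2]

theorem bresDrops_succ_neg (r d e0 i : Int) (hd : 0 < d) (hr0 : 0 ≤ r)
    (hcase : ¬ e0 - i * r + d * bresDrops r d e0 i - r < 0) :
    bresDrops r d e0 (i + 1) = bresDrops r d e0 i := by
  have hb := bresDrops_bracket r d e0 i hd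
  unfold bresDrops at *
  rw [PySem.Int.floordiv_eq_iff_of_pos hd]
  constructor <;> nlinarith [hb.1, hb.2]

-- loop invariant: after k iterations the state is
--   (error, partial_sum, result) =
--   (e0 - k*r + d * drops k, k*q + drops k, [f 0, ..., f k])  with f i = i*q + drops i
theorem bres_inv (q r d e0 : Int) (hd : 0 < d) (hr0 : 0 ≤ r) (hr1 : r < d)
    (he0 : 0 ≤ e0) (he1 : e0 < d) (k : Nat) :
    (PySem.List.pyRange 0 (k : Int) 1).foldl
        (fun st _ => bresenhamStep q r d st) (e0, 0, [0]) =
      (e0 - (k : Int) * r + d * bresDrops r d e0 k,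
       (k : Int) * q + bresDrops r d e0 k,
       (PySem.List.pyRange 0 ((k : Int) + 1) 1).map
         (fun i => i * q + bresDrops r d e0 i)) := by
  induction k with
  | zero =>
    have h0 : bresDrops r d e0 0 = 0 := by
      unfold bresDrops
      rw [PySem.Int.floordiv_eq_iff_of_pos hd]
      constructor <;> omega
    simp [PySem.List.pyRange_one_eq_nil, h0]
    have hr01 : PySem.List.pyRange 0 1 1 = [0] := by decide
    rw [hr01]
    simp [h0]
  | succ n ih =>
    have hcast : ((n + 1 : Nat) : Int) = (n : Int) + 1 := by push_cast; ring
    rw [hcast, PySem.List.pyRange_one_succ_right (by positivity), List.foldl_append, ih]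
    rw [show ((n : Int) + 1 + 1) = ((n : Int) + 1) + 1 by ring,
      PySem.List.pyRange_one_succ_right (a := 0) (b := (n : Int) + 1) (by positivity),
      List.map_append]
    simp only [List.foldl_cons, List.foldl_nil, List.map_cons, List.map_nil]
    unfold bresenhamStep
    dsimp only
    by_cases hcase : e0 - (n : Int) * r + d * bresDrops r d e0 (n : Int) - r < 0
    · have hdrop := bresDrops_succ_pos r d e0 (n : Int) hd hr1 hcase
      rw [if_pos hcase]
      simp only [Prod.mk.injEq, hdrop]
      refine ⟨by ring, by ring, ?_⟩
      have hab : (n : Int) * q + bresDrops r d e0 (n : Int) + (q + 1)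
          = ((n : Int) + 1) * q + (bresDrops r d e0 (n : Int) + 1) := by ring
      rw [hab]
    · have hdrop := bresDrops_succ_neg r d e0 (n : Int) hd hr0 hcase
      rw [if_neg hcase]
      simp only [Prod.mk.injEq, hdrop]
      refine ⟨by ring, by ring, ?_⟩
      have hab : (n : Int) * q + bresDrops r d e0 (n : Int) + q
          = ((n : Int) + 1) * q + bresDrops r d e0 (n : Int) := by ring
      rw [hab]

-- ===== VERDICT (by name: the statement is the Claim_ definition above) =====
theorem bresenham_sums_py_spec : Claim_equal_bresenham_sums_py := by
  intro num denom _hdom hpre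
  obtain ⟨h0, h1⟩ := hpre
  unfold Spec_bresenham_sums_py bresenham_sums_py bresenham_sums_py_alt
  rw [if_neg (by omega), if_neg (by omega), if_neg (by omega), if_neg (by omega)]
  have hd : (0 : Int) < denom := by omega
  have hshift : denom >>> (1 : Nat) = denom / 2 := by
    have := Int.shiftRight_eq_div_pow denom 1
    norm_num at this; exact this
  have hr0 : 0 ≤ PySem.Int.mod num denom := by
    rw [PySem.Int.mod_eq_emod_of_pos hd]; exact Int.emod_nonneg num (by omega)
  have hr1 : PySem.Int.mod num denom < denom := by
    rw [PySem.Int.mod_eq_emod_of_pos hd]; exact Int.emod_lt_of_pos num hd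
  have he0 : 0 ≤ denom >>> (1 : Nat) := by rw [hshift]; omega
  have he1 : denom >>> (1 : Nat) < denom := by rw [hshift]; omega
  have hk : ((denom.toNat : Nat) : Int) = denom := Int.toNat_of_nonneg (by omega)
  have := bres_inv (PySem.Int.floordiv num denom) (PySem.Int.mod num denom) denom
    (denom >>> (1 : Nat)) hd hr0 hr1 he0 he1 denom.toNat
  rw [hk] at this
  simp only [this, bresDrops]
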